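-- pv_equiv track=rewrite | github.com/tomy807/codingtest | programmersKit/cafe24_1.py | solution
-- ===== SOURCE A (Python) =====
-- def solution(startNumber, endNumber):
--     save='000000000'+str(startNumber)
--     answer = [save]
--     if startNumber<endNumber:
--         while(startNumber<endNumber):
--             startNumber+=1
--             save=save[1:]+str(startNumber)
--             answer.append(save)
--     else:
--         while(startNumber>endNumber):
--             startNumber-=1
--             save=save[1:]+str(startNumber)
--             answer.append(save)
--     return answer
-- ===== SOURCE B (Python) =====
-- def solution(startNumber, endNumber):
--     if startNumber < endNumber:
--         nums = range(startNumber, endNumber + 1)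
--     else:
--         nums = range(startNumber, endNumber - 1, -1)
--     full = '000000000'
--     answer = []
--     for i, n in enumerate(nums):
--         full += str(n)
--         answer.append(full[i:])
--     return answer
-- ===== Notes on version B (the rewrite author's own statement) =====
-- stated objective: alternative
-- what changed: B replaces A's sliding window (drop the first character, append str(next)) by a single cumulative buffer of all rendered numbers plus an enumerate-index-driven slice full[i:], iterating over an explicit range instead of mutating the loop bound.
import Mathlib
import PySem

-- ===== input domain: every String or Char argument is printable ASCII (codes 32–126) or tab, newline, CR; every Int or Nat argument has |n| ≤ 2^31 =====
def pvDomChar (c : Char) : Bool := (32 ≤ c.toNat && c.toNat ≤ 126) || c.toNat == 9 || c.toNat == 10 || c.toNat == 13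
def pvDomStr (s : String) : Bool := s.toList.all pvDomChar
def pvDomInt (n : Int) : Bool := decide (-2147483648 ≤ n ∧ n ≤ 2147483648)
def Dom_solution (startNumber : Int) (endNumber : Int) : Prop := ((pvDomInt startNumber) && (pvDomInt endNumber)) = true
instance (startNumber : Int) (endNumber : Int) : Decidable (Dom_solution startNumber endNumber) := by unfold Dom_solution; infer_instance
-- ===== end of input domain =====

-- B replaces A's drop-front/append sliding window by a cumulative buffer plus an
-- enumerate-index-driven slice (same answers; objective: alternative decomposition).
-- Strings are ported on List Char via PySem.Chars; '000000000' is its 9-char list.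

-- ===== PORT A =====
-- the ascending while loop: startNumber += 1; save = save[1:] + str(startNumber); answer.append(save)
def solGoUp (s e : Int) (save : List Char) (acc : List String) : List String :=
  if s < e then
    let save' := PySem.List.slice save (some 1) none ++ PySem.Int.toChars (s + 1)
    solGoUp (s + 1) e save' (acc ++ [String.ofList save'])
  else acc
termination_by (e - s).toNat
decreasing_by omega

-- the descending while loop: startNumber -= 1; save = save[1:] + str(startNumber); answer.append(save)
def solGoDown (s e : Int) (save : List Char) (acc : List String) : List String :=
  if s > e then
    let save' := PySem.List.slice save (some 1) none ++ PySem.Int.toChars (s - 1)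
    solGoDown (s - 1) e save' (acc ++ [String.ofList save'])
  else acc
termination_by (s - e).toNat
decreasing_by omega

def solution (startNumber : Int) (endNumber : Int) : List String :=
  let save := ['0', '0', '0', '0', '0', '0', '0', '0', '0'] ++ PySem.Int.toChars startNumber
  let answer := [String.ofList save]
  if startNumber < endNumber then solGoUp startNumber endNumber save answer
  else solGoDown startNumber endNumber save answer

-- ===== PORT B =====
-- for i, n in enumerate(nums): full += str(n); answer.append(full[i:])
def solution_alt (startNumber : Int) (endNumber : Int) : List String :=
  let nums := if startNumber < endNumber then PySem.List.pyRange startNumber (endNumber + 1) 1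
              else PySem.List.pyRange startNumber (endNumber - 1) (-1)
  ((PySem.List.enumerate nums 0).foldl
    (fun (p : List Char × List String) q =>
      let full := p.1 ++ PySem.Int.toChars q.2
      (full, p.2 ++ [String.ofList (PySem.List.slice full (some q.1) none)]))
    (['0', '0', '0', '0', '0', '0', '0', '0', '0'], [])).2

-- ===== PRECONDITION & SPEC =====
def Spec_solution (startNumber : Int) (endNumber : Int) (out : List String) : Prop := out = solution_alt startNumber endNumber
instance (startNumber : Int) (endNumber : Int) (out : List String) : Decidable (Spec_solution startNumber endNumber out) := by unfold Spec_solution; infer_instance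

-- ===== CLAIM (what is proved, stated in full; the proofs are below) =====
def Claim_equal_solution : Prop := ∀ (startNumber : Int) (endNumber : Int), Dom_solution startNumber endNumber → Spec_solution startNumber endNumber (solution startNumber endNumber)

-- ===== LEMMAS AND PROOFS =====

-- A's loop body, as a function of the current window and the next number
def aStep (save : List Char) (n : Int) : List Char :=
  PySem.List.slice save (some 1) none ++ PySem.Int.toChars n

-- A's while loop rephrased as structural recursion over the list of remaining numbers
def aFold : List Int → List Char → List String → List String
  | [], _, acc => acc
  | n :: t, save, acc => aFold t (aStep save n) (acc ++ [String.ofList (aStep save n)])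

-- B's loop body
def bStep (p : List Char × List String) (q : Int × Int) : List Char × List String :=
  (p.1 ++ PySem.Int.toChars q.2,
   p.2 ++ [String.ofList (PySem.List.slice (p.1 ++ PySem.Int.toChars q.2) (some q.1) none)])

lemma bStep_eq : bStep = (fun (p : List Char × List String) q =>
      let full := p.1 ++ PySem.Int.toChars q.2
      (full, p.2 ++ [String.ofList (PySem.List.slice full (some q.1) none)])) := rfl

lemma len_toDigitsCore_ge (b f n : Nat) (l : List Char) :
    l.length ≤ (Nat.toDigitsCore b f n l).length := by
  induction f generalizing n l with
  | zero => simp [Nat.toDigitsCore]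
  | succ f ih =>
    simp only [Nat.toDigitsCore]
    split
    · simp
    · exact le_trans (by simp) (ih _ _)

lemma one_le_len_toDigits (b m : Nat) : 1 ≤ (Nat.toDigits b m).length := by
  simp only [Nat.toDigits, Nat.toDigitsCore]
  split
  · simp
  · have := len_toDigitsCore_ge b m (m / b) [Nat.digitChar (m % b)]
    simp at this
    omega

lemma one_le_len_toChars (n : Int) : 1 ≤ (PySem.Int.toChars n).length := by
  unfold PySem.Int.toChars
  split
  · simp
  · exact one_le_len_toDigits 10 n.toNat

lemma solGoUp_eq_aFold (k : Nat) : ∀ (s e : Int) (save : List Char) (acc : List String),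
    (e - s).toNat ≤ k →
    solGoUp s e save acc = aFold (PySem.List.pyRange (s + 1) (e + 1) 1) save acc := by
  induction k with
  | zero =>
    intro s e save acc hk
    rw [solGoUp, PySem.List.pyRange_one_eq_nil (by omega)]
    simp only [aFold]
    rw [if_neg (by omega)]
  | succ k ih =>
    intro s e save acc hk
    by_cases h : s < e
    · rw [solGoUp, if_pos h, PySem.List.pyRange_one_cons (by omega)]
      simp only [aFold, aStep]
      exact ih (s + 1) e _ _ (by omega)
    · rw [solGoUp, if_neg h, PySem.List.pyRange_one_eq_nil (by omega)]
      simp only [aFold]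

lemma solGoDown_eq_aFold (k : Nat) : ∀ (s e : Int) (save : List Char) (acc : List String),
    (s - e).toNat ≤ k →
    solGoDown s e save acc = aFold (PySem.List.pyRange (s - 1) (e - 1) (-1)) save acc := by
  induction k with
  | zero =>
    intro s e save acc hk
    rw [solGoDown, PySem.List.pyRange_neg_one_eq_nil (by omega)]
    simp only [aFold]
    rw [if_neg (by omega)]
  | succ k ih =>
    intro s e save acc hk
    by_cases h : s > e
    · rw [solGoDown, if_pos h, PySem.List.pyRange_neg_one_cons (by omega)]
      simp only [aFold, aStep]
      exact ih (s - 1) e _ _ (by omega)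
    · rw [solGoDown, if_neg h, PySem.List.pyRange_neg_one_eq_nil (by omega)]
      simp only [aFold]

lemma aStep_drop (full : List Char) (k : Nat) (n : Int) (h : k + 1 ≤ full.length) :
    aStep (full.drop k) n = (full ++ PySem.Int.toChars n).drop (k + 1) := by
  rw [aStep, PySem.List.slice_from_one, List.tail_drop,
      List.drop_append_of_le_length (by omega)]

-- the central invariant: A's window is B's buffer with the first k chars sliced off
lemma bridge (ns : List Int) : ∀ (k : Nat) (full : List Char) (acc : List String),
    k + 1 ≤ full.length →
    aFold ns (full.drop k) acc =
      ((PySem.List.enumerate ns ((k : Int) + 1)).foldl bStep (full, acc)).2 := by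
  induction ns with
  | nil => intro k full acc h; simp [aFold, PySem.List.enumerate_nil]
  | cons n t ih =>
    intro k full acc h
    rw [PySem.List.enumerate_cons]
    simp only [List.foldl_cons, aFold]
    rw [aStep_drop full k n h]
    have hs : PySem.List.slice (full ++ PySem.Int.toChars n) (some ((k : Int) + 1)) none
        = (full ++ PySem.Int.toChars n).drop (k + 1) := by
      have := PySem.List.slice_from_natCast (full ++ PySem.Int.toChars n) (k + 1)
      push_cast at this ⊢
      exact this
    have hb : bStep (full, acc) (((k : Int) + 1), n)
        = (full ++ PySem.Int.toChars n,
           acc ++ [String.ofList ((full ++ PySem.Int.toChars n).drop (k + 1))]) := by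
      rw [bStep, hs]
    rw [hb]
    have := ih (k + 1) (full ++ PySem.Int.toChars n)
      (acc ++ [String.ofList ((full ++ PySem.Int.toChars n).drop (k + 1))])
      (by have := one_le_len_toChars n; simp; omega)
    push_cast at this
    exact this

lemma bridge0 (ns : List Int) (acc : List String)
    (full : List Char) (hlen : 1 ≤ full.length) :
    aFold ns full acc = ((PySem.List.enumerate ns 1).foldl bStep (full, acc)).2 := by
  have := bridge ns 0 full acc (by omega)
  simpa using this

-- ===== VERDICT (by name: the statement is the Claim_ definition above) =====
theorem solution_spec : Claim_equal_solution := by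
  intro s e _
  unfold Spec_solution solution solution_alt
  rw [← bStep_eq]
  by_cases h : s < e
  · simp only [if_pos h]
    rw [PySem.List.pyRange_one_cons (by omega : s < e + 1), PySem.List.enumerate_cons]
    simp only [List.foldl_cons]
    have hb : bStep (['0','0','0','0','0','0','0','0','0'], []) ((0 : Int), s)
        = (['0','0','0','0','0','0','0','0','0'] ++ PySem.Int.toChars s,
           [String.ofList (['0','0','0','0','0','0','0','0','0'] ++ PySem.Int.toChars s)]) := by
      rw [bStep]
      simp
    rw [hb, solGoUp_eq_aFold (e - s).toNat s e _ _ (le_refl _),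
        bridge0 _ _ _ (by simp)]
    norm_num
  · simp only [if_neg h]
    rw [PySem.List.pyRange_neg_one_cons (by omega : e - 1 < s), PySem.List.enumerate_cons]
    simp only [List.foldl_cons]
    have hb : bStep (['0','0','0','0','0','0','0','0','0'], []) ((0 : Int), s)
        = (['0','0','0','0','0','0','0','0','0'] ++ PySem.Int.toChars s,
           [String.ofList (['0','0','0','0','0','0','0','0','0'] ++ PySem.Int.toChars s)]) := by
      rw [bStep]
      simp
    rw [hb, solGoDown_eq_aFold (s - e).toNat s e _ _ (le_refl _),
        bridge0 _ _ _ (by simp)]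
    norm_num
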